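-- pv_equiv track=rewrite | github.com/soundmud/soundrts | soundrts/clientgame.py | _get_relevant_menu
-- ===== SOURCE A (Python) =====
-- def _get_relevant_menu(menu):
--     _m = menu[:]
--     for x in ["stop",
--               "cancel_training", "cancel_upgrading", "cancel_building",
--               "mode_offensive", "mode_defensive",
--               "load", "load_all", "unload", "unload_all"]:
--         if x in _m:
--             _m.remove(x)
--     return _m
-- ===== SOURCE B (Python) =====
-- _MENU_COMMANDS = ("stop",
--                   "cancel_training", "cancel_upgrading", "cancel_building",
--                   "mode_offensive", "mode_defensive",
--                   "load", "load_all", "unload", "unload_all")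
--
--
-- def _get_relevant_menu(menu):
--     remaining = set(_MENU_COMMANDS)
--     result = []
--     for x in menu:
--         if x in remaining:
--             remaining.discard(x)  # skip only the first occurrence, like list.remove
--         else:
--             result.append(x)
--     return result
-- ===== Notes on version B (the rewrite author's own statement) =====
-- stated objective: idiomatic
-- what changed: Replaces A's loop over the 10 fixed commands (each with an O(n) membership scan plus an O(n) list.remove on a copy of menu) by a single pass over menu consulting a consumable set of the commands: on the first hit of a command it is discarded from the set and the element skipped, otherwise the element is appended to the result.
import Mathlib
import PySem

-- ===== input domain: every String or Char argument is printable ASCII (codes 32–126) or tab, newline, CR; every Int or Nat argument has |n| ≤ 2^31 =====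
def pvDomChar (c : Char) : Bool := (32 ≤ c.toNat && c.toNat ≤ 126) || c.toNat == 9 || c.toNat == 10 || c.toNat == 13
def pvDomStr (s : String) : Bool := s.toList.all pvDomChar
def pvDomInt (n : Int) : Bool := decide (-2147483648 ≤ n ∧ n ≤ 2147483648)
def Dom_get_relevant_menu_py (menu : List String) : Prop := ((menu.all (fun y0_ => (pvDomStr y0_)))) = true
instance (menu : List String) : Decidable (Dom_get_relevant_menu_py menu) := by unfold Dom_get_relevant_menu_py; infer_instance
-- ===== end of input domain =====

-- B replaces A's loop over the 10 fixed commands (membership scan + list.remove each)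
-- by a single pass over menu that consults and consumes a set of the commands (idiomatic).


-- ===== PORT A =====
-- A: copy menu, then for each of the 10 fixed commands, if present remove its first occurrence.
def get_relevant_menu_py (menu : List String) : List String :=
  ["stop",
   "cancel_training", "cancel_upgrading", "cancel_building",
   "mode_offensive", "mode_defensive",
   "load", "load_all", "unload", "unload_all"].foldl
    (fun _m x => if _m.contains x then (PySem.List.remove? _m x).getD _m else _m)
    menu

-- ===== PORT B =====
def pvMenuCommands : List String :=
  ["stop",
   "cancel_training", "cancel_upgrading", "cancel_building",
   "mode_offensive", "mode_defensive",
   "load", "load_all", "unload", "unload_all"]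

-- B's loop: one pass over menu, consuming `remaining` (a Python set) on first hits.
def pvMenuPass (remaining : PySem.Set String) : List String → List String
  | [] => []
  | x :: xs =>
    if PySem.Set.contains remaining x then
      pvMenuPass (PySem.Set.discard remaining x) xs
    else
      x :: pvMenuPass remaining xs

def get_relevant_menu_py_alt (menu : List String) : List String :=
  pvMenuPass (PySem.Set.ofList pvMenuCommands) menu

-- ===== PRECONDITION & SPEC =====
def Spec_get_relevant_menu_py (menu : List String) (out : List String) : Prop := out = get_relevant_menu_py_alt menu
instance (menu : List String) (out : List String) : Decidable (Spec_get_relevant_menu_py menu out) := by unfold Spec_get_relevant_menu_py; infer_instance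

-- ===== CLAIM (what is proved, stated in full; the proofs are below) =====
def Claim_equal_get_relevant_menu_py : Prop := ∀ (menu : List String), Dom_get_relevant_menu_py menu → Spec_get_relevant_menu_py menu (get_relevant_menu_py menu)

-- ===== LEMMAS AND PROOFS =====

-- A's loop body is exactly "erase the first occurrence (no-op if absent)".
theorem pvStep_eq_erase (m : List String) (x : String) :
    (if m.contains x then (PySem.List.remove? m x).getD m else m) = m.erase x := by
  by_cases h : x ∈ m
  · have hc : m.contains x = true := by simpa using h
    rw [if_pos hc, PySem.List.remove?_eq_some_erase m x h]; rfl
  · simp [List.erase_of_not_mem h, h]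

theorem pvMenuPass_empty (menu : List String) : pvMenuPass [] menu = menu := by
  induction menu with
  | nil => rfl
  | cons y ys ih => simp [pvMenuPass, PySem.Set.contains, ih]

-- Erasing x after the pass = adding x (at the end) to the consumable set, provided x is not in it.
theorem pvMenuPass_erase (x : String) (menu : List String) :
    ∀ S : List String, x ∉ S → (pvMenuPass S menu).erase x = pvMenuPass (S ++ [x]) menu := by
  induction menu with
  | nil => intro S _; rfl
  | cons y ys ih =>
    intro S hx
    by_cases hy : y ∈ S
    · have hy' : y ∈ S ++ [x] := List.mem_append_left _ hy
      have hyx : x ∉ PySem.Set.discard S y := by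
        simp [PySem.Set.discard]; intro h; exact absurd h hx
      rw [pvMenuPass, pvMenuPass, if_pos (by simpa [PySem.Set.contains] using hy),
          if_pos (by simpa [PySem.Set.contains] using hy'), ih _ hyx]
      congr 1
      have hxy : (x == y) = false := by
        rw [beq_eq_false_iff_ne]; intro h; subst h; exact hx hy
      simp [PySem.Set.discard, List.filter_append, hxy]
    · by_cases hyx : y = x
      · subst hyx
        have hy' : y ∈ S ++ [y] := List.mem_append_right _ (by simp)
        rw [pvMenuPass, pvMenuPass, if_neg (by simpa [PySem.Set.contains] using hy),
            if_pos (by simpa [PySem.Set.contains] using hy')]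
        have hfil : ∀ a ∈ S, (!(a == y)) = true := fun a ha => by
          simp only [Bool.not_eq_true', beq_eq_false_iff_ne]
          intro h; subst h; exact hy ha
        have : PySem.Set.discard (S ++ [y]) y = S := by
          simp [PySem.Set.discard, List.filter_append, List.filter_eq_self.mpr hfil]
        rw [this, List.erase_cons_head]
      · have hy' : y ∉ S ++ [x] := by
          simp [hyx]; exact fun h => absurd h hy
        rw [pvMenuPass, pvMenuPass, if_neg (by simpa [PySem.Set.contains] using hy),
            if_neg (by simpa [PySem.Set.contains] using hy'),
            List.erase_cons_tail (by simp [hyx]), ih _ hx]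

-- Folding erase over a duplicate-free command list = one consuming pass.
theorem pvFold_eq_pass (cmds : List String) :
    ∀ S menu, cmds.Nodup → (∀ x ∈ cmds, x ∉ S) →
      cmds.foldl (fun m x => m.erase x) (pvMenuPass S menu) = pvMenuPass (S ++ cmds) menu := by
  induction cmds with
  | nil => intro S menu _ _; simp
  | cons c cs ih =>
    intro S menu hnd hdisj
    have hc : c ∉ S := hdisj c (by simp)
    rw [List.foldl_cons, pvMenuPass_erase c menu S hc,
        ih (S ++ [c]) menu hnd.of_cons (by
          intro x hx
          simp only [List.mem_append, List.mem_singleton]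
          rintro (h | rfl)
          · exact hdisj x (by simp [hx]) h
          · exact (List.nodup_cons.mp hnd).1 hx)]
    simp

-- ===== VERDICT (by name: the statement is the Claim_ definition above) =====
theorem get_relevant_menu_py_spec : Claim_equal_get_relevant_menu_py := by
  intro menu _
  unfold Spec_get_relevant_menu_py get_relevant_menu_py get_relevant_menu_py_alt
  have hsteps : (fun (m : List String) x => if m.contains x then (PySem.List.remove? m x).getD m else m)
      = fun m x => m.erase x := by
    funext m x; exact pvStep_eq_erase m x
  rw [hsteps]
  have hof : PySem.Set.ofList pvMenuCommands = pvMenuCommands := by decide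
  have h2 := pvFold_eq_pass pvMenuCommands [] menu (by decide) (by simp)
  rw [pvMenuPass_empty, List.nil_append] at h2
  rw [hof]
  exact h2
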